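-- pv_equiv track=rewrite | github.com/PavcaHyx/log-parsing-utility | util.py | get_last_lines
-- ===== SOURCE A (Python) =====
-- def get_last_lines(inserted_file, count_of_lines, last_line):
--     if count_of_lines <= 0:
--         return []
--     else:
--         current_line = 0
--         last_num_lines = []
--         started_line = last_line - count_of_lines + 1
--         for line in inserted_file:
--             current_line += 1
--             if current_line >= started_line:
--                 last_num_lines.append(line)
--     return last_num_lines
-- ===== SOURCE B (Python) =====
-- def get_last_lines(inserted_file, count_of_lines, last_line):
--     if count_of_lines <= 0:
--         return []
--     lines = list(inserted_file)
--     return lines[max(0, last_line - count_of_lines):]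
-- ===== Notes on version B (the rewrite author's own statement) =====
-- stated objective: simpler
-- what changed: Replaced the running 1-based line counter with conditional append by materializing the list once and taking a single clamped slice lines[max(0, last_line - count_of_lines):].
import Mathlib
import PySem

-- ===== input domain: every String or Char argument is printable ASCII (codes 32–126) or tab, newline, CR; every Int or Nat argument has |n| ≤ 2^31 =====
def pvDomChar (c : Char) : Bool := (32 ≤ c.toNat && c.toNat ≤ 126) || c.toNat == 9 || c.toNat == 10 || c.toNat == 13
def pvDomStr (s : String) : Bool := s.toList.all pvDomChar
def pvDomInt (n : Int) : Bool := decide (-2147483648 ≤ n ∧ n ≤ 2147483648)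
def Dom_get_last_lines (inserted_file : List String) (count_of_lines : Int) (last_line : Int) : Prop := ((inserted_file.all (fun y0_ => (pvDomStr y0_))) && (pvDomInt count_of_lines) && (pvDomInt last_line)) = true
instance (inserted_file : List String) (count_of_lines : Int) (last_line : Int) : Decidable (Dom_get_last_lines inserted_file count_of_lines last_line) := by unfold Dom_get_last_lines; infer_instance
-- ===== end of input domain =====

-- ===== PORT A =====
-- B replaces A's running line counter + conditional append with a single clamped slice (simpler).
def get_last_lines (inserted_file : List String) (count_of_lines : Int) (last_line : Int) : List String :=
  if count_of_lines ≤ 0 then []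
  else
    let started_line := last_line - count_of_lines + 1
    (inserted_file.foldl
      (fun (st : Int × List String) line =>
        let current_line := st.1 + 1
        (current_line, if current_line ≥ started_line then st.2 ++ [line] else st.2))
      (0, [])).2

-- ===== PORT B =====
def get_last_lines_alt (inserted_file : List String) (count_of_lines : Int) (last_line : Int) : List String :=
  if count_of_lines ≤ 0 then []
  else inserted_file.drop (max 0 (last_line - count_of_lines)).toNat

-- ===== PRECONDITION & SPEC =====
def Spec_get_last_lines (inserted_file : List String) (count_of_lines : Int) (last_line : Int) (out : List String) : Prop := out = get_last_lines_alt inserted_file count_of_lines last_line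
instance (inserted_file : List String) (count_of_lines : Int) (last_line : Int) (out : List String) : Decidable (Spec_get_last_lines inserted_file count_of_lines last_line out) := by unfold Spec_get_last_lines; infer_instance

-- ===== CLAIM (what is proved, stated in full; the proofs are below) =====
def Claim_equal_get_last_lines : Prop := ∀ (inserted_file : List String) (count_of_lines : Int) (last_line : Int), Dom_get_last_lines inserted_file count_of_lines last_line → Spec_get_last_lines inserted_file count_of_lines last_line (get_last_lines inserted_file count_of_lines last_line)

-- ===== LEMMAS AND PROOFS =====

-- ===== VERDICT (by name: the statement is the Claim_ definition above) =====
-- loop invariant: folding from counter n with accumulator acc appends exactly the suffix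
-- of f starting at index (started - n - 1), clamped at 0
theorem get_last_lines_loop (f : List String) (started : Int) :
    ∀ (n : Int) (acc : List String),
      (f.foldl
        (fun (st : Int × List String) line =>
          let current_line := st.1 + 1
          (current_line, if current_line ≥ started then st.2 ++ [line] else st.2))
        (n, acc)).2 = acc ++ f.drop (max 0 (started - n - 1)).toNat := by
  induction f with
  | nil => intro n acc; simp
  | cons a t ih =>
    intro n acc
    simp only [List.foldl]
    by_cases h : n + 1 ≥ started
    · rw [ih]
      have h1 : (max 0 (started - n - 1)).toNat = 0 := by omega
      have h2 : (max 0 (started - (n+1) - 1)).toNat = 0 := by omega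
      simp [h, h1, h2]
    · rw [ih]
      have h1 : (max 0 (started - n - 1)).toNat = (max 0 (started - (n+1) - 1)).toNat + 1 := by omega
      simp [h, h1]

theorem get_last_lines_spec : Claim_equal_get_last_lines := by
  intro f c l _
  unfold Spec_get_last_lines get_last_lines get_last_lines_alt
  by_cases hc : c ≤ 0
  · simp [hc]
  · simp only [hc, if_false]
    rw [get_last_lines_loop]
    simp only [List.nil_append]
    congr 1
    omega
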